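-- pv_equiv track=rewrite | github.com/rejaneol/persistencia-poliglota | models/carrinhos.py | maisComumEmLista
-- ===== SOURCE A (Python) =====
-- import itertools
-- import operator
--
-- def maisComumEmLista(L):
--   # get an iterable of (item, iterable) pairs
--   SL = sorted((x, i) for i, x in enumerate(L))
--   # print 'SL:', SL
--   groups = itertools.groupby(SL, key=operator.itemgetter(0))
--   # auxiliary function to get "quality" for an item
--   def _auxfun(g):
--     item, iterable = g
--     count = 0
--     min_index = len(L)
--     for _, where in iterable:
--       count += 1
--       min_index = min(min_index, where)
--     # print 'item %r, count %r, minind %r' % (item, count, min_index)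
--     return count, -min_index
--   # pick the highest-count/earliest item
--   return max(groups, key=_auxfun)[0]
-- ===== SOURCE B (Python) =====
-- def maisComumEmLista(L):
--   counts = {}
--   for x in L:
--     counts[x] = counts.get(x, 0) + 1
--   m = max(counts.values())
--   for x in L:
--     if counts[x] == m:
--       return x
-- ===== Notes on version B (the rewrite author's own statement) =====
-- stated objective: faster
-- what changed: Replaces sort + itertools.groupby + argmax over (count, -min_index) keys by a one-pass count dict, taking the max count, and re-scanning the original list in order so that the first element with that count supplies the earliest-first-occurrence tie-break.
-- outside the precondition, e.g. on maisComumEmLista([]): A raises ValueError, B raises ValueError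
import Mathlib
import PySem

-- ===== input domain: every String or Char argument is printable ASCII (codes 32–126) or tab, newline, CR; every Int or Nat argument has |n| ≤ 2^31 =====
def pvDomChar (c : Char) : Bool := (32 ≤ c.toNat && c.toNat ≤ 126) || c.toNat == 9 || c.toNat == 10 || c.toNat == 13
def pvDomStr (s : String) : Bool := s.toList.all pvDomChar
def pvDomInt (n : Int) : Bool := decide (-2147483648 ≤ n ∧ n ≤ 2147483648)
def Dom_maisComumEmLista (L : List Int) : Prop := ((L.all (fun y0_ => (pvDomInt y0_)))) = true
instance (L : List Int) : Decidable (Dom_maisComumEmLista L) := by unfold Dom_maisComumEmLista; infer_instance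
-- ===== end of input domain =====

-- B replaces sort+groupby+argmax by a one-pass counter, max count, and an in-order
-- re-scan of L for the first element with that count (objective: faster, measured).

-- ===== PORT A =====
-- itertools.groupby over the sorted pair list: consecutive runs of equal first components.
def pvGroupBy : List (Int × Int) → List (Int × List (Int × Int))
  | [] => []
  | p :: rest =>
      (p.1, p :: rest.takeWhile (fun q => q.1 == p.1)) ::
        pvGroupBy (rest.dropWhile (fun q => q.1 == p.1))
termination_by l => l.length
decreasing_by
  simp only [List.length_cons]
  exact Nat.lt_succ_of_le (List.length_dropWhile_le _ _)

-- _auxfun: count the group and take the least index, starting min_index = len(L).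
def pvAuxFun (n : Nat) (g : Int × List (Int × Int)) : Int × Int :=
  let r := g.2.foldl (fun (acc : Int × Int) p => (acc.1 + 1, min acc.2 p.2)) (0, (n : Int))
  (r.1, -r.2)

def maisComumEmLista (L : List Int) : Int :=
  let SL := PySem.List.sorted2 ((PySem.List.enumerate L 0).map (fun q => (q.2, q.1)))
      (fun p => p.1) (fun p => p.2)
  let groups := pvGroupBy SL
  match PySem.List.max2? groups (fun g => (pvAuxFun L.length g).1)
      (fun g => (pvAuxFun L.length g).2) with
  | some g => g.1
  | none => 0   -- unreachable under Pre_ (Python raises ValueError on an empty list)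

-- ===== PORT B =====
def maisComumEmLista_alt (L : List Int) : Int :=
  let counts := L.foldl (fun (d : PySem.Dict Int Int) x => d.insert x (d.getD x 0 + 1)) PySem.Dict.empty
  let m := match PySem.List.max? counts.values (fun v => v) with
    | some v => v
    | none => 0   -- unreachable under Pre_ (Python raises ValueError on an empty list)
  match L.find? (fun x => counts.getD x 0 == m) with
  | some x => x
  | none => 0   -- unreachable: the maximal count is attained by some element of L

-- ===== PRECONDITION & SPEC =====
-- Python raises ValueError (max of an empty sequence) on [], in both A and B.
def Pre_maisComumEmLista (L : List Int) : Prop := L ≠ []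
instance (L : List Int) : Decidable (Pre_maisComumEmLista L) := by unfold Pre_maisComumEmLista; infer_instance
def pvWitness_maisComumEmLista : List Int := [3, 1, 3, 1, 2]

def Spec_maisComumEmLista (L : List Int) (out : Int) : Prop := out = maisComumEmLista_alt L
instance (L : List Int) (out : Int) : Decidable (Spec_maisComumEmLista L out) := by unfold Spec_maisComumEmLista; infer_instance

-- ===== CLAIM (what is proved, stated in full; the proofs are below) =====
def Claim_equal_maisComumEmLista : Prop := ∀ (L : List Int), Dom_maisComumEmLista L → Pre_maisComumEmLista L → Spec_maisComumEmLista L (maisComumEmLista L)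

-- ===== LEMMAS AND PROOFS =====

-- The common characterisation: r is the most common element of L, earliest first
-- occurrence breaking ties.
def pvIsMode (L : List Int) (r : Int) : Prop :=
  r ∈ L ∧ ∀ y ∈ L, L.count y < L.count r ∨ (L.count y = L.count r ∧ L.idxOf r ≤ L.idxOf y)


lemma pv_idxOf_le {L : List Int} {a : Int} {i : Nat} (h : i < L.length) (hv : L[i] = a) :
    L.idxOf a ≤ i := by
  by_contra hc
  have hc' : i < L.findIdx (· == a) := by
    simpa [List.idxOf] using Nat.lt_of_not_le hc
  obtain ⟨_, hall⟩ := (List.lt_findIdx_iff L (· == a) i).mp hc'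
  have := hall i (le_refl i)
  simp [hv] at this

lemma pvIsMode_unique {L : List Int} {r r' : Int} (h : pvIsMode L r) (h' : pvIsMode L r') : r = r' := by
  obtain ⟨hr, hmax⟩ := h
  obtain ⟨hr', hmax'⟩ := h'
  have h1 := hmax r' hr'
  have h2 := hmax' r hr
  have hcnt : L.count r = L.count r' := by omega
  have hidx : L.idxOf r = L.idxOf r' := by omega
  have e1 : L[L.idxOf r]'(List.idxOf_lt_length_of_mem hr) = r := List.getElem_idxOf _
  have e2 : L[L.idxOf r']'(List.idxOf_lt_length_of_mem hr') = r' := List.getElem_idxOf _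
  rw [← e1, ← e2]
  simp [hidx]

lemma pvFold2 {α : Type} (k1 k2 : α → Int) (xs : List α) : ∀ a : α,
    ∃ m, xs.foldl (fun acc x =>
      match acc with
      | none => some x
      | some mm => if (decide (k1 mm < k1 x) || !decide (k1 x < k1 mm) && decide (k2 mm < k2 x)) = true then some x else some mm)
      (some a) = some m ∧ (m = a ∨ m ∈ xs) ∧
      (k1 a < k1 m ∨ (k1 a = k1 m ∧ k2 a ≤ k2 m)) ∧
      ∀ y ∈ xs, k1 y < k1 m ∨ (k1 y = k1 m ∧ k2 y ≤ k2 m) := by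
  induction xs with
  | nil => exact fun a => ⟨a, rfl, Or.inl rfl, Or.inr ⟨rfl, le_refl _⟩, by simp⟩
  | cons x t ih =>
    intro a
    simp only [List.foldl_cons]
    show ∃ m, t.foldl _ (if (decide (k1 a < k1 x) || !decide (k1 x < k1 a) && decide (k2 a < k2 x)) = true then some x else some a) = some m ∧ _
    by_cases hc : (decide (k1 a < k1 x) || !decide (k1 x < k1 a) && decide (k2 a < k2 x)) = true
    · obtain ⟨m, hm, hmem, hord, hall⟩ := ih x
      refine ⟨m, by rw [if_pos hc]; exact hm, ?_, ?_, ?_⟩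
      · rcases hmem with h | h
        · exact Or.inr (h ▸ List.mem_cons_self)
        · exact Or.inr (List.mem_cons_of_mem _ h)
      · simp only [Bool.or_eq_true, Bool.and_eq_true, Bool.not_eq_true', decide_eq_true_eq, decide_eq_false_iff_not] at hc
        rcases hc with h | ⟨h1, h2⟩ <;> rcases hord with h' | ⟨h'1, h'2⟩ <;>
          [skip; skip; skip; skip] <;>
          (by_cases hax : k1 a < k1 m
           · exact Or.inl hax
           · exact Or.inr ⟨by omega, by omega⟩)
      · intro y hy
        rcases List.mem_cons.mp hy with rfl | hy'
        · exact hord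
        · exact hall y hy'
    · obtain ⟨m, hm, hmem, hord, hall⟩ := ih a
      refine ⟨m, by rw [if_neg hc]; exact hm, ?_, hord, ?_⟩
      · rcases hmem with h | h
        · exact Or.inl h
        · exact Or.inr (List.mem_cons_of_mem _ h)
      · intro y hy
        rcases List.mem_cons.mp hy with rfl | hy'
        · simp only [Bool.or_eq_true, Bool.and_eq_true, Bool.not_eq_true', decide_eq_true_eq, decide_eq_false_iff_not] at hc
          push Not at hc
          rcases hord with h' | ⟨h'1, h'2⟩
          · left; omega
          · obtain ⟨h1, h2⟩ := hc
            by_cases hy1 : k1 y < k1 a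
            · left; omega
            · right
              constructor <;> omega
        · exact hall y hy'


lemma pvMax2_spec {α : Type} (k1 k2 : α → Int) (x : α) (t : List α) :
    ∃ m, PySem.List.max2? (x :: t) k1 k2 = some m ∧ (m ∈ x :: t) ∧
      ∀ y ∈ x :: t, k1 y < k1 m ∨ (k1 y = k1 m ∧ k2 y ≤ k2 m) := by
  obtain ⟨m, hm, hmem, hord, hall⟩ := pvFold2 k1 k2 t x
  refine ⟨m, ?_, ?_, ?_⟩
  · simpa [PySem.List.max2?] using hm
  · rcases hmem with rfl | h
    · exact List.mem_cons_self
    · exact List.mem_cons_of_mem _ h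
  · intro y hy
    rcases List.mem_cons.mp hy with rfl | hy'
    · exact hord
    · exact hall y hy'



lemma pvSorted2_eq (xs : List (Int × Int)) :
    PySem.List.sorted2 xs (fun p => p.1) (fun p => p.2) =
      PySem.List.sorted xs (fun p => toLex (p.1, p.2)) := by
  unfold PySem.List.sorted2 PySem.List.sorted
  simp only [if_neg (by decide : ¬ (false = true))]
  congr 1
  funext acc x
  congr 1
  funext a b
  by_cases h1 : a.1 < b.1 <;> by_cases h2 : b.1 < a.1 <;> by_cases h3 : a.2 < b.2 <;>
    simp [h1, h2, h3, Prod.Lex.toLex_lt_toLex] <;> omega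


lemma pvSL_pairwise (xs : List (Int × Int)) :
    (PySem.List.sorted2 xs (fun p => p.1) (fun p => p.2)).Pairwise (fun a b => a.1 ≤ b.1) := by
  rw [pvSorted2_eq]
  refine (PySem.List.sorted_pairwise xs (fun p => toLex (p.1, p.2))).imp ?_
  intro a b h
  rcases Prod.Lex.toLex_le_toLex.mp h with h' | ⟨h1, _⟩
  · exact le_of_lt h'
  · exact le_of_eq h1


lemma pvDrop_gt {p : Int × Int} {rest : List (Int × Int)}
    (hs : (p :: rest).Pairwise (fun a b => a.1 ≤ b.1)) :
    ∀ q ∈ rest.dropWhile (fun q => q.1 == p.1), p.1 < q.1 := by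
  intro q hq
  have hrest : rest.Pairwise (fun a b => a.1 ≤ b.1) := hs.of_cons
  have hd : (rest.dropWhile (fun q => q.1 == p.1)).Pairwise (fun a b => a.1 ≤ b.1) :=
    hrest.sublist (List.dropWhile_sublist _)
  have hple : p.1 ≤ q.1 := by
    have hqrest : q ∈ rest := (List.dropWhile_sublist _).mem hq
    exact (List.pairwise_cons.mp hs).1 q hqrest
  -- head of the dropWhile fails the predicate, later elements are ≥ the head
  cases hdw : rest.dropWhile (fun q => q.1 == p.1) with
  | nil => simp [hdw] at hq
  | cons e d' =>
    have he : ¬ (e.1 == p.1) = true := by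
      have := List.head_dropWhile_not (fun q => q.1 == p.1) (l := rest) (by simp [hdw])
      simpa [hdw] using this
    have hep : p.1 < e.1 := by
      have : p.1 ≤ e.1 := (List.pairwise_cons.mp hs).1 e ((List.dropWhile_sublist _).mem (by rw [hdw]; exact List.mem_cons_self))
      simp only [beq_iff_eq] at he
      omega
    rw [hdw] at hq
    rcases List.mem_cons.mp hq with rfl | hq'
    · exact hep
    · have : e.1 ≤ q.1 := by
        rw [hdw] at hd
        exact (List.pairwise_cons.mp hd).1 q hq'
      omega


lemma pvTake_eq {p : Int × Int} {rest : List (Int × Int)} :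
    ∀ q ∈ rest.takeWhile (fun q => q.1 == p.1), q.1 = p.1 := by
  intro q hq
  have := List.mem_takeWhile_imp hq
  simpa using this


lemma pvGroupBy_sound : ∀ (xs : List (Int × Int)), xs.Pairwise (fun a b => a.1 ≤ b.1) →
    ∀ kg ∈ pvGroupBy xs, kg.2 ≠ [] ∧ kg.2 = xs.filter (fun q => q.1 == kg.1) := by
  intro xs
  induction xs using pvGroupBy.induct with
  | case1 => intro _ kg h; simp [pvGroupBy] at h
  | case2 p rest ih =>
    intro hs kg hkg
    rw [pvGroupBy] at hkg
    have hsplit : rest = rest.takeWhile (fun q => q.1 == p.1) ++ rest.dropWhile (fun q => q.1 == p.1) :=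
      (List.takeWhile_append_dropWhile).symm
    rcases List.mem_cons.mp hkg with rfl | hmem
    · refine ⟨by simp, ?_⟩
      show p :: rest.takeWhile (fun q => q.1 == p.1) = (p :: rest).filter (fun q => q.1 == p.1)
      rw [List.filter_cons_of_pos (by simp)]
      congr 1
      conv_rhs => rw [hsplit]
      rw [List.filter_append]
      have h1 : (rest.takeWhile (fun q => q.1 == p.1)).filter (fun q => q.1 == p.1)
          = rest.takeWhile (fun q => q.1 == p.1) :=
        List.filter_eq_self.mpr (fun q hq => by simpa using pvTake_eq q hq)
      have h2 : (rest.dropWhile (fun q => q.1 == p.1)).filter (fun q => q.1 == p.1) = [] := by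
        rw [List.filter_eq_nil_iff]
        intro q hq
        have := pvDrop_gt hs q hq
        simp only [beq_iff_eq]
        omega
      rw [h1, h2, List.append_nil]
    · have hd : (rest.dropWhile (fun q => q.1 == p.1)).Pairwise (fun a b => a.1 ≤ b.1) :=
        (hs.of_cons).sublist (List.dropWhile_sublist _)
      obtain ⟨hne, heq⟩ := ih hd kg hmem
      refine ⟨hne, ?_⟩
      -- kg's key is > p.1 :
      have hkey : p.1 < kg.1 := by
        obtain ⟨q, hq⟩ := List.exists_mem_of_ne_nil _ hne
        have hqf : q ∈ (rest.dropWhile (fun q => q.1 == p.1)).filter (fun q => q.1 == kg.1) := heq ▸ hq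
        have hqd := List.mem_filter.mp hqf
        have := pvDrop_gt hs q hqd.1
        have : q.1 = kg.1 := by simpa using hqd.2
        omega
      rw [heq]
      rw [List.filter_cons_of_neg (by simp only [beq_iff_eq]; omega)]
      conv_rhs => rw [hsplit]
      rw [List.filter_append]
      have htf : (rest.takeWhile (fun q => q.1 == p.1)).filter (fun q => q.1 == kg.1) = [] := by
        rw [List.filter_eq_nil_iff]
        intro q hq
        have := pvTake_eq q hq
        simp
        omega
      rw [htf, List.nil_append]


lemma pvGroupBy_cover : ∀ (xs : List (Int × Int)) (q : Int × Int), q ∈ xs →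
    ∃ g, (q.1, g) ∈ pvGroupBy xs := by
  intro xs
  induction xs using pvGroupBy.induct with
  | case1 => intro q hq; simp at hq
  | case2 p rest ih =>
    intro q hq
    rcases List.mem_cons.mp hq with rfl | hq'
    · exact ⟨q :: rest.takeWhile (fun r => r.1 == q.1), by rw [pvGroupBy]; exact List.mem_cons_self⟩
    · have : q ∈ rest.takeWhile (fun r => r.1 == p.1) ++ rest.dropWhile (fun r => r.1 == p.1) := by
        rw [List.takeWhile_append_dropWhile]; exact hq'
      rcases List.mem_append.mp this with ht | hd
      · have hqp : q.1 = p.1 := pvTake_eq q ht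
        exact ⟨p :: rest.takeWhile (fun r => r.1 == p.1), by rw [pvGroupBy, hqp]; exact List.mem_cons_self⟩
      · obtain ⟨g, hg⟩ := ih q hd
        exact ⟨g, by rw [pvGroupBy]; exact List.mem_cons_of_mem _ hg⟩


lemma pv_min_eval {L : List Int} {k : Int} (hk : k ∈ L) :
    ((PySem.List.enumerate L 0).filter (fun q => q.2 == k)).foldl
      (fun (a : Int) q => min a q.1) (L.length : Int) = (L.idxOf k : Int) := by
  set I := (PySem.List.enumerate L 0).filter (fun q => q.2 == k) with hI
  have hfm : I.foldl (fun (a : Int) q => min a q.1) (L.length : Int)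
      = (I.map (fun q => q.1)).foldl min (L.length : Int) := by
    rw [List.foldl_map]
  rw [hfm]
  set J := I.map (fun q => q.1) with hJ
  have hidxlt : L.idxOf k < L.length := List.idxOf_lt_length_of_mem hk
  have hmemJ : ((L.idxOf k : Int)) ∈ J := by
    refine List.mem_map.mpr ⟨(((L.idxOf k : Int)), L[L.idxOf k]'hidxlt), ?_, rfl⟩
    refine List.mem_filter.mpr ⟨?_, by simp [List.getElem_idxOf]⟩
    exact (PySem.List.mem_enumerate_iff L 0 _).mpr ⟨L.idxOf k, hidxlt, by simp⟩
  have hboundsJ : ∀ y ∈ J, (L.idxOf k : Int) ≤ y := by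
    intro y hy
    obtain ⟨q, hq, rfl⟩ := List.mem_map.mp hy
    obtain ⟨hqe, hqk⟩ := List.mem_filter.mp hq
    obtain ⟨i, hi, rfl⟩ := (PySem.List.mem_enumerate_iff L 0 q).mp hqe
    have hLi : L[i] = k := by simpa using hqk
    have := pv_idxOf_le hi hLi
    simp
    omega
  obtain ⟨hle, hally⟩ := PySem.List.foldl_min_le J (L.length : Int)
  rcases PySem.List.foldl_min_mem J (L.length : Int) with heq | hmem
  · have := hally _ hmemJ
    omega
  · have h1 := hboundsJ _ hmem
    have h2 := hally _ hmemJ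
    omega


lemma pvAux_eval {L : List Int} {k : Int} {g : List (Int × Int)} (hne : g ≠ [])
    (hperm : g.Perm (((PySem.List.enumerate L 0).map (fun q => (q.2, q.1))).filter
      (fun q => q.1 == k))) :
    k ∈ L ∧ pvAuxFun L.length (k, g) = ((L.count k : Int), -(L.idxOf k : Int)) := by
  have hfm : (((PySem.List.enumerate L 0).map (fun q => (q.2, q.1))).filter (fun q => q.1 == k))
      = ((PySem.List.enumerate L 0).filter (fun q => q.2 == k)).map (fun q => (q.2, q.1)) := by
    rw [List.filter_map]
    rfl
  rw [hfm] at hperm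
  -- k ∈ L
  have hkL : k ∈ L := by
    obtain ⟨q, hq⟩ := List.exists_mem_of_ne_nil _ hne
    have := hperm.mem_iff.mp hq
    obtain ⟨e, he, hqe⟩ := List.mem_map.mp this
    obtain ⟨hee, hek⟩ := List.mem_filter.mp he
    obtain ⟨i, hi, rfl⟩ := (PySem.List.mem_enumerate_iff L 0 e).mp hee
    have : L[i] = k := by simpa using hek
    exact this ▸ List.getElem_mem hi
  refine ⟨hkL, ?_⟩
  unfold pvAuxFun
  rw [PySem.List.foldl_prod_mk (f := fun (a : Int) (_ : Int × Int) => a + 1)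
    (g := fun (a : Int) (p : Int × Int) => min a p.2)]
  have hcount : g.foldl (fun (a : Int) (_ : Int × Int) => a + 1) 0 = (L.count k : Int) := by
    have h1 : g.foldl (fun (a : Int) (_ : Int × Int) => a + 1) 0
        = 0 + (g.map (fun (_ : Int × Int) => (1 : Int))).sum := by
      exact PySem.List.foldl_add g (fun _ => 1) 0
    rw [h1, PySem.List.sum_map_const_int, hperm.length_eq]
    simp only [List.length_map, ← List.countP_eq_length_filter]
    rw [List.count_eq_countP]
    have h2 : List.countP (fun (q : Int × Int) => q.2 == k) (PySem.List.enumerate L 0)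
        = List.countP (fun x => x == k) L := by
      conv_rhs => rw [← PySem.List.map_snd_enumerate L 0]
      rw [List.countP_map]
      rfl
    rw [h2]
    ring
  have hmin : g.foldl (fun (a : Int) (p : Int × Int) => min a p.2) (L.length : Int)
      = (L.idxOf k : Int) := by
    have hrc : RightCommutative (fun (a : Int) (p : Int × Int) => min a p.2) := by
      constructor
      intro a b c
      show min (min a b.2) c.2 = min (min a c.2) b.2
      rw [min_assoc, min_comm b.2, ← min_assoc]
    have hperm' := @List.Perm.foldl_eq _ _ (fun (a : Int) (p : Int × Int) => min a p.2) _ _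
      hrc hperm (L.length : Int)
    rw [hperm', List.foldl_map]
    exact pv_min_eval hkL
  rw [hcount, hmin]


lemma pvA_isMode {L : List Int} (hL : L ≠ []) : pvIsMode L (maisComumEmLista L) := by
  simp only [maisComumEmLista]
  set P := (PySem.List.enumerate L 0).map (fun q => (q.2, q.1)) with hP
  set SL := PySem.List.sorted2 P (fun p => p.1) (fun p => p.2) with hSL
  have hperm : SL.Perm P := PySem.List.sorted2_perm P _ _ false
  have hSLne : SL ≠ [] := by
    intro h
    have := hperm.length_eq
    rw [h] at this
    simp [hP, PySem.List.length_enumerate] at this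
    exact hL (List.length_eq_zero_iff.mp this.symm)
  obtain ⟨s0, SL', hSLcons⟩ := List.exists_cons_of_ne_nil hSLne
  -- groups is nonempty
  have hgroups : pvGroupBy SL = (s0.1, s0 :: SL'.takeWhile (fun q => q.1 == s0.1)) ::
      pvGroupBy (SL'.dropWhile (fun q => q.1 == s0.1)) := by
    rw [hSLcons, pvGroupBy]
  obtain ⟨m, hm, hmmem, hmax⟩ := pvMax2_spec (fun g => (pvAuxFun L.length g).1)
    (fun g => (pvAuxFun L.length g).2) (s0.1, s0 :: SL'.takeWhile (fun q => q.1 == s0.1))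
    (pvGroupBy (SL'.dropWhile (fun q => q.1 == s0.1)))
  rw [← hgroups] at hm hmmem hmax
  rw [hm]
  show pvIsMode L m.1
  -- properties of each group
  have hpw : SL.Pairwise (fun a b => a.1 ≤ b.1) := pvSL_pairwise P
  have hgprop : ∀ kg ∈ pvGroupBy SL, kg.1 ∈ L ∧
      pvAuxFun L.length kg = ((L.count kg.1 : Int), -(L.idxOf kg.1 : Int)) := by
    intro kg hkg
    obtain ⟨hne, heq⟩ := pvGroupBy_sound SL hpw kg hkg
    have hfperm : kg.2.Perm (P.filter (fun q => q.1 == kg.1)) := by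
      rw [heq]
      exact hperm.filter _
    have := pvAux_eval hne (by rw [← hP]; exact hfperm)
    obtain ⟨h1, h2⟩ := this
    exact ⟨h1, by rw [← h2]⟩
  obtain ⟨hmL, hmaux⟩ := hgprop m hmmem
  refine ⟨hmL, ?_⟩
  intro y hy
  -- find y's group
  obtain ⟨i, hi, hyi⟩ := List.mem_iff_getElem.mp hy
  have hyP : ((y, (i : Int))) ∈ P := by
    rw [hP]
    refine List.mem_map.mpr ⟨((i : Int), y), ?_, rfl⟩
    exact (PySem.List.mem_enumerate_iff L 0 _).mpr ⟨i, hi, by simp [hyi]⟩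
  have hySL : ((y, (i : Int))) ∈ SL := hperm.mem_iff.mpr hyP
  obtain ⟨g, hg⟩ := pvGroupBy_cover SL ((y, (i : Int))) hySL
  obtain ⟨hyL, hyaux⟩ := hgprop (y, g) hg
  have := hmax (y, g) hg
  rw [hyaux, hmaux] at this
  simp only at this
  rcases this with h | ⟨h1, h2⟩
  · left
    exact_mod_cast h
  · right
    constructor
    · exact_mod_cast h1
    · omega


lemma pvB_isMode {L : List Int} (hL : L ≠ []) : pvIsMode L (maisComumEmLista_alt L) := by
  have hvals : (PySem.Dict.counter L).values
      = (PySem.Set.ofList L).map (fun k => ((L.count k : Int))) := by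
    rw [PySem.Dict.values_eq_map_keys _ (PySem.Dict.nodup_keys_counter L) 0,
      PySem.Dict.keys_counter]
    exact List.map_congr_left (fun k _ => PySem.Dict.getD_counter L k)
  simp only [maisComumEmLista_alt, PySem.Dict.foldl_insert_getD_add_one_eq_counter, hvals]
  obtain ⟨x0, L', rfl⟩ := List.exists_cons_of_ne_nil hL
  set L : List Int := x0 :: L' with hLdef
  have hvne : (PySem.Set.ofList L).map (fun k => ((L.count k : Int))) ≠ [] := by
    rw [hLdef, PySem.Set.ofList_cons]
    simp
  obtain ⟨m, hm⟩ : ∃ m, PySem.List.max?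
      ((PySem.Set.ofList L).map (fun k => ((L.count k : Int)))) (fun v => v) = some m := by
    cases h : PySem.List.max? ((PySem.Set.ofList L).map (fun k => ((L.count k : Int)))) (fun v => v) with
    | none => exact absurd ((PySem.List.max?_eq_none_iff _ _).mp h) hvne
    | some v => exact ⟨v, rfl⟩
  rw [hm]
  have hmmem := PySem.List.max?_mem hm
  obtain ⟨k0, hk0mem, hk0⟩ := List.mem_map.mp hmmem
  have hk0L : k0 ∈ L := (PySem.Set.mem_ofList _ _).mp hk0mem
  have hle : ∀ y ∈ L, (L.count y : Int) ≤ m := by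
    intro y hy
    exact PySem.List.max?_isMax hm _ (List.mem_map_of_mem ((PySem.Set.mem_ofList _ _).mpr hy))
  have hfind : (L.find? (fun x => (PySem.Dict.counter L).getD x 0 == m)).isSome := by
    rw [List.find?_isSome]
    exact ⟨k0, hk0L, by simp [PySem.Dict.getD_counter, hk0]⟩
  obtain ⟨r, hr⟩ := Option.isSome_iff_exists.mp hfind
  rw [hr]
  show pvIsMode L r
  obtain ⟨hpr, as, bs, hsplit, has⟩ := List.find?_eq_some_iff_append.mp hr
  have hrcnt : (L.count r : Int) = m := by
    simpa [PySem.Dict.getD_counter] using hpr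
  have hrmem : r ∈ L := by rw [hsplit]; simp
  refine ⟨hrmem, fun y hy => ?_⟩
  have hycnt := hle y hy
  by_cases hcase : L.count y = L.count r
  · refine Or.inr ⟨hcase, ?_⟩
    have hras : r ∉ as := by
      intro hmem
      have := has r hmem
      simp [hrcnt, PySem.Dict.getD_counter] at this
    have hyas : y ∉ as := by
      intro hmem
      have := has y hmem
      simp [PySem.Dict.getD_counter, hcase, hrcnt] at this
    rw [hsplit, List.idxOf_append_of_notMem hras, List.idxOf_append_of_notMem hyas]
    simp
  · left
    have h2 : L.count y ≤ L.count r := by exact_mod_cast hrcnt ▸ hycnt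
    omega

-- ===== VERDICT (by name: the statement is the Claim_ definition above) =====
theorem maisComumEmLista_spec : Claim_equal_maisComumEmLista := by
  intro L _ hpre
  exact (pvIsMode_unique (pvA_isMode hpre) (pvB_isMode hpre)).symm ▸ rfl
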